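-- pv_equiv track=rewrite | github.com/HQkim/algorithm | baekjoon/14696.py | check_win_2
-- ===== SOURCE A (Python) =====
-- def check_win_2(a_list, b_list):  # 어 위는 112ms였다가 이건 144ms? 왜 더느리지 ㅋㅋ
--     a_list.sort()
--     b_list.sort()
--     a_win = False
--     b_win = False
--
--     while a_list and b_list:
--         a = a_list.pop()
--         b = b_list.pop()
--         if a > b:
--             a_win = True
--             break
--         elif a < b:
--             b_win = True
--             break
--
--     if a_win:
--         return "A"
--     elif b_win:
--         return "B"
--     elif a_list:
--         return "A"
--     elif b_list:
--         return "B"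
--     else:
--         return "D"
-- ===== SOURCE B (Python) =====
-- def check_win_2(a_list, b_list):
--     # Counting re-implementation: tally each side's card values once, then decide
--     # at the highest value where the tallies differ (no full sort of the hands).
--     # Unlike A, this does not mutate its arguments; the return value is identical.
--     ca = {}
--     for x in a_list:
--         ca[x] = ca.get(x, 0) + 1
--     cb = {}
--     for x in b_list:
--         cb[x] = cb.get(x, 0) + 1
--     for v in sorted(set(ca) | set(cb), reverse=True):
--         d = ca.get(v, 0) - cb.get(v, 0)
--         if d > 0:
--             return "A"
--         if d < 0:
--             return "B"
--     return "D"
-- ===== Notes on version B (the rewrite author's own statement) =====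
-- stated objective: alternative
-- what changed: Replaced A's sort-both-lists-then-pop-from-the-ends loop by a counting approach: tally each hand's value counts in a dict once, then scan the distinct values from highest down and decide at the first value where the tallies differ; only the distinct values are sorted and the argument lists are not mutated (A sorts them in place).
import Mathlib
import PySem

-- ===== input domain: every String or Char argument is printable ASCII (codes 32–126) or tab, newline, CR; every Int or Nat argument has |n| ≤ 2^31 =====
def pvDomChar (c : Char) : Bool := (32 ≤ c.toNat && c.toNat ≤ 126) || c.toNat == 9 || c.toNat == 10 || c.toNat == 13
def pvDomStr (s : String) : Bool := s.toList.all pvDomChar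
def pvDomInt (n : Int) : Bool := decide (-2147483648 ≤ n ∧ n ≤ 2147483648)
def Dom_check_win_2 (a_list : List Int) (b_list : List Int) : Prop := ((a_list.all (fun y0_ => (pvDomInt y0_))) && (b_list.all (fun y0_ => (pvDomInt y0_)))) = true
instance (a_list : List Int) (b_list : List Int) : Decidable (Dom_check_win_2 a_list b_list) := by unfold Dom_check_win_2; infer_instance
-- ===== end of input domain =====

-- B replaces A's sort-both-hands-then-pop loop by tallying value counts once and deciding
-- at the highest value where the tallies differ (objective: alternative algorithm; only the
-- distinct values get sorted). Return values are identical; A additionally sorts its argument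
-- lists in place, B performs no mutation — the equivalence proved here is about the return value.

-- ===== PORT A =====
-- post-loop return code of A (the if/elif chain after the while loop)
def postA (a_win b_win : Bool) (a_list b_list : List Int) : String :=
  if a_win then "A"
  else if b_win then "B"
  else if !a_list.isEmpty then "A"
  else if !b_list.isEmpty then "B"
  else "D"

-- A's while loop; 'lst.pop()' on a nonempty list = its last element, the list losing it
def loopA : List Int → List Int → String
  | [], bl => postA false false [] bl
  | a0 :: as_, [] => postA false false (a0 :: as_) []
  | a0 :: as_, b0 :: bs =>
    let a := PySem.List.pyGetD (a0 :: as_) (-1) 0      -- a = a_list.pop()  (value)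
    let al := (a0 :: as_).dropLast                      --                   (removal)
    let b := PySem.List.pyGetD (b0 :: bs) (-1) 0
    let bl := (b0 :: bs).dropLast
    if a > b then postA true false al bl
    else if a < b then postA false true al bl
    else loopA al bl
termination_by al _ => al.length
decreasing_by simp [List.length_dropLast]

def check_win_2 (a_list : List Int) (b_list : List Int) : String :=
  loopA (PySem.List.sorted a_list (fun x => x) false) (PySem.List.sorted b_list (fun x => x) false)

-- ===== PORT B =====
-- B's decision loop: first value (scanned highest-first) whose tallies differ decides
def goB : List Int → PySem.Dict Int Int → PySem.Dict Int Int → String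
  | [], _, _ => "D"
  | v :: vs, ca, cb =>
    let d := ca.getD v 0 - cb.getD v 0
    if d > 0 then "A"
    else if d < 0 then "B"
    else goB vs ca cb

def check_win_2_alt (a_list : List Int) (b_list : List Int) : String :=
  let ca := a_list.foldl (fun d x => d.insert x (d.getD x 0 + 1)) PySem.Dict.empty
  let cb := b_list.foldl (fun d x => d.insert x (d.getD x 0 + 1)) PySem.Dict.empty
  goB (PySem.List.sorted (PySem.Set.union ca.keys cb.keys) (fun x => x) true) ca cb

-- ===== PRECONDITION & SPEC =====
def Spec_check_win_2 (a_list : List Int) (b_list : List Int) (out : String) : Prop := out = check_win_2_alt a_list b_list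
instance (a_list : List Int) (b_list : List Int) (out : String) : Decidable (Spec_check_win_2 a_list b_list out) := by unfold Spec_check_win_2; infer_instance

-- ===== CLAIM (what is proved, stated in full; the proofs are below) =====
def Claim_equal_check_win_2 : Prop := ∀ (a_list : List Int) (b_list : List Int), Dom_check_win_2 a_list b_list → Spec_check_win_2 a_list b_list (check_win_2 a_list b_list)

-- ===== LEMMAS AND PROOFS =====

-- common reference: lexicographic comparison of the two hands listed in descending order
def cmpDesc : List Int → List Int → String
  | [], [] => "D"
  | _ :: _, [] => "A"
  | [], _ :: _ => "B"
  | a :: p, b :: q => if a > b then "A" else if a < b then "B" else cmpDesc p q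

-- ---------- A side ----------

lemma loopA_concat (al bl : List Int) (a b : Int) :
    loopA (al ++ [a]) (bl ++ [b]) =
      if a > b then postA true false al bl
      else if a < b then postA false true al bl
      else loopA al bl := by
  rcases List.exists_cons_of_ne_nil (l := al ++ [a]) (by simp) with ⟨x, xs, hx⟩
  rcases List.exists_cons_of_ne_nil (l := bl ++ [b]) (by simp) with ⟨y, ys, hy⟩
  rw [hx, hy, loopA, ← hx, ← hy]
  simp [PySem.List.pyGetD_neg_one_append_singleton]

lemma loopA_rev : ∀ (p q : List Int), loopA p.reverse q.reverse = cmpDesc p q := by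
  intro p
  induction p with
  | nil =>
    intro q
    cases q with
    | nil => simp [loopA, cmpDesc, postA]
    | cons b q' => simp [loopA, cmpDesc, postA]
  | cons a p' ih =>
    intro q
    cases q with
    | nil =>
      rcases List.exists_cons_of_ne_nil (l := (a :: p').reverse) (by simp) with ⟨x, xs, hx⟩
      rw [hx, loopA.eq_def]
      simp [cmpDesc, postA]
    | cons b q' =>
      rw [List.reverse_cons, List.reverse_cons, loopA_concat]
      rcases lt_trichotomy a b with h | h | h
      · simp [cmpDesc, postA, h]
      · subst h
        simp [cmpDesc, ih q']
      · simp [cmpDesc, postA, h]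

lemma check_win_2_eq_cmpDesc (a_list b_list : List Int) :
    check_win_2 a_list b_list =
      cmpDesc (PySem.List.sorted a_list (fun x => x) false).reverse
              (PySem.List.sorted b_list (fun x => x) false).reverse := by
  unfold check_win_2
  rw [← loopA_rev]
  simp

-- ---------- B side ----------

-- descending decomposition: a ≥-sorted hand bounded by v is v's copies followed by the rest
lemma desc_decomp (v : Int) :
    ∀ (p : List Int), p.Pairwise (· ≥ ·) → (∀ x ∈ p, x ≤ v) →
      p = List.replicate (p.count v) v ++ p.filter (· != v) := by
  intro p
  induction p with
  | nil => simp
  | cons x t ih =>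
    intro hp hle
    by_cases hxv : x = v
    · subst hxv
      have ht := ih hp.of_cons (fun y hy => hle y (List.mem_cons_of_mem _ hy))
      simpa [List.count_cons, List.replicate_succ] using ht
    · have hxlt : x < v := lt_of_le_of_ne (hle x (List.mem_cons_self)) hxv
      have hall : ∀ y ∈ x :: t, y ≤ x := by
        intro y hy
        rcases List.mem_cons.mp hy with rfl | hy
        · exact le_rfl
        · exact List.rel_of_pairwise_cons hp hy
      have hvnot : v ∉ x :: t := fun hm => absurd (hall v hm) (not_le.mpr hxlt)
      have hcount : (x :: t).count v = 0 := List.count_eq_zero.mpr hvnot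
      have hfilter : (x :: t).filter (· != v) = x :: t := by
        apply List.filter_eq_self.mpr
        intro y hy
        exact bne_iff_ne.mpr (fun h => hvnot (h ▸ hy))
      rw [hcount, hfilter]
      simp

lemma cmpDesc_replicate (v : Int) :
    ∀ (c : Nat) (p q : List Int),
      cmpDesc (List.replicate c v ++ p) (List.replicate c v ++ q) = cmpDesc p q := by
  intro c
  induction c with
  | zero => simp
  | succ n ih =>
    intro p q
    simp [List.replicate_succ, cmpDesc, ih]

lemma cmpDesc_A_wins (v : Int) (p q : List Int) (hq : ∀ x ∈ q, x < v) :
    cmpDesc (v :: p) q = "A" := by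
  cases q with
  | nil => rfl
  | cons y ys => simp [cmpDesc, hq y List.mem_cons_self]

lemma cmpDesc_B_wins (v : Int) (p q : List Int) (hp : ∀ x ∈ p, x < v) :
    cmpDesc p (v :: q) = "B" := by
  cases p with
  | nil => rfl
  | cons y ys =>
    have h := hp y List.mem_cons_self
    simp [cmpDesc, h, not_lt.mpr h.le]

-- main B-side invariant: goB over a strictly-descending value list covering both hands
-- computes the lexicographic comparison of the descending hands
lemma goB_eq_cmpDesc :
    ∀ (vals : List Int), vals.Pairwise (· > ·) →
    ∀ (p q : List Int), p.Pairwise (· ≥ ·) → q.Pairwise (· ≥ ·) →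
      (∀ x ∈ p, x ∈ vals) → (∀ x ∈ q, x ∈ vals) →
    ∀ (ca cb : PySem.Dict Int Int),
      (∀ u ∈ vals, ca.getD u 0 = (p.count u : Int)) →
      (∀ u ∈ vals, cb.getD u 0 = (q.count u : Int)) →
      goB vals ca cb = cmpDesc p q := by
  intro vals
  induction vals with
  | nil =>
    intro _ p q _ _ hpmem hqmem ca cb _ _
    have hp : p = [] := List.eq_nil_iff_forall_not_mem.mpr (fun x hx => List.not_mem_nil (hpmem x hx))
    have hq : q = [] := List.eq_nil_iff_forall_not_mem.mpr (fun x hx => List.not_mem_nil (hqmem x hx))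
    subst hp; subst hq; rfl
  | cons v vs ih =>
    intro hvals p q hp hq hpmem hqmem ca cb hca hcb
    have hvlt : ∀ u ∈ vs, u < v := fun u hu => List.rel_of_pairwise_cons hvals hu
    have hple : ∀ x ∈ p, x ≤ v := by
      intro x hx
      rcases List.mem_cons.mp (hpmem x hx) with rfl | hx'
      · exact le_rfl
      · exact (hvlt x hx').le
    have hqle : ∀ x ∈ q, x ≤ v := by
      intro x hx
      rcases List.mem_cons.mp (hqmem x hx) with rfl | hx'
      · exact le_rfl
      · exact (hvlt x hx').le
    have hpdec := desc_decomp v p hp hple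
    have hqdec := desc_decomp v q hq hqle
    have hp'lt : ∀ x ∈ p.filter (· != v), x < v := by
      intro x hx
      have hmem := (List.mem_filter.mp hx).1
      have hne : x ≠ v := bne_iff_ne.mp (List.mem_filter.mp hx).2
      exact lt_of_le_of_ne (hple x hmem) hne
    have hq'lt : ∀ x ∈ q.filter (· != v), x < v := by
      intro x hx
      have hmem := (List.mem_filter.mp hx).1
      have hne : x ≠ v := bne_iff_ne.mp (List.mem_filter.mp hx).2
      exact lt_of_le_of_ne (hqle x hmem) hne
    have hcav := hca v List.mem_cons_self
    have hcbv := hcb v List.mem_cons_self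
    show (if ca.getD v 0 - cb.getD v 0 > 0 then "A"
          else if ca.getD v 0 - cb.getD v 0 < 0 then "B"
          else goB vs ca cb) = cmpDesc p q
    rcases lt_trichotomy (p.count v) (q.count v) with hc | hc | hc
    · -- B has strictly more copies of v
      have hd : ca.getD v 0 - cb.getD v 0 < 0 := by rw [hcav, hcbv]; omega
      rw [if_neg (by omega), if_pos hd]
      conv_rhs => rw [hpdec, hqdec]
      have hsplit : q.count v = p.count v + ((q.count v) - (p.count v)) := by omega
      rw [hsplit, List.replicate_add, List.append_assoc, cmpDesc_replicate]
      have hone : q.count v - p.count v = (q.count v - p.count v - 1) + 1 := by omega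
      rw [hone, List.replicate_succ, List.cons_append]
      exact (cmpDesc_B_wins v _ _ hp'lt).symm
    · -- equal tallies of v: strip them and recurse
      have hd : ca.getD v 0 - cb.getD v 0 = 0 := by rw [hcav, hcbv, hc]; omega
      rw [if_neg (by omega), if_neg (by omega)]
      have hrec := ih hvals.of_cons (p.filter (· != v)) (q.filter (· != v))
        (hp.filter _) (hq.filter _)
        (by intro x hx
            rcases List.mem_cons.mp (hpmem x (List.mem_filter.mp hx).1) with rfl | h
            · exact absurd rfl (bne_iff_ne.mp (List.mem_filter.mp hx).2)
            · exact h)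
        (by intro x hx
            rcases List.mem_cons.mp (hqmem x (List.mem_filter.mp hx).1) with rfl | h
            · exact absurd rfl (bne_iff_ne.mp (List.mem_filter.mp hx).2)
            · exact h)
        ca cb
        (by intro u hu
            have hne : u ≠ v := ne_of_lt (hvlt u hu)
            rw [hca u (List.mem_cons_of_mem _ hu)]
            exact_mod_cast (List.count_filter (p := fun x => x != v) (a := u) (l := p) (by simpa using hne)).symm)
        (by intro u hu
            have hne : u ≠ v := ne_of_lt (hvlt u hu)
            rw [hcb u (List.mem_cons_of_mem _ hu)]
            exact_mod_cast (List.count_filter (p := fun x => x != v) (a := u) (l := q) (by simpa using hne)).symm)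
      rw [hrec]
      conv_rhs => rw [hpdec, hqdec]
      rw [hc, cmpDesc_replicate]
    · -- A has strictly more copies of v
      have hd : ca.getD v 0 - cb.getD v 0 > 0 := by rw [hcav, hcbv]; omega
      rw [if_pos hd]
      conv_rhs => rw [hpdec, hqdec]
      have hsplit : p.count v = q.count v + ((p.count v) - (q.count v)) := by omega
      rw [hsplit, List.replicate_add, List.append_assoc, cmpDesc_replicate]
      have hone : p.count v - q.count v = (p.count v - q.count v - 1) + 1 := by omega
      rw [hone, List.replicate_succ, List.cons_append]
      exact (cmpDesc_A_wins v _ _ hq'lt).symm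

lemma check_win_2_alt_eq_cmpDesc (a_list b_list : List Int) :
    check_win_2_alt a_list b_list =
      cmpDesc (PySem.List.sorted a_list (fun x => x) false).reverse
              (PySem.List.sorted b_list (fun x => x) false).reverse := by
  unfold check_win_2_alt
  rw [PySem.Dict.foldl_insert_getD_add_one_eq_counter, PySem.Dict.foldl_insert_getD_add_one_eq_counter]
  set p := (PySem.List.sorted a_list (fun x => x) false).reverse with hpdef
  set q := (PySem.List.sorted b_list (fun x => x) false).reverse with hqdef
  have hpperm : p.Perm a_list := (List.reverse_perm _).trans (PySem.List.sorted_perm _ _ _)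
  have hqperm : q.Perm b_list := (List.reverse_perm _).trans (PySem.List.sorted_perm _ _ _)
  set s := PySem.Set.union (PySem.Dict.keys (PySem.Dict.counter a_list)) (PySem.Dict.keys (PySem.Dict.counter b_list)) with hsdef
  have hsnodup : s.Nodup := by
    rw [hsdef, PySem.Dict.keys_counter]
    exact PySem.Set.nodup_union _ _ (PySem.Set.nodup_ofList _)
  have hsmem : ∀ x : Int, x ∈ s ↔ (x ∈ a_list ∨ x ∈ b_list) := by
    intro x
    rw [hsdef, PySem.Dict.keys_counter, PySem.Dict.keys_counter, PySem.Set.mem_union,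
        PySem.Set.mem_ofList, PySem.Set.mem_ofList]
  set vals := PySem.List.sorted s (fun x => x) true with hvdef
  have hvnodup : vals.Nodup := ((PySem.List.sorted_perm _ _ _).nodup_iff).mpr hsnodup
  have hvpair : vals.Pairwise (· > ·) := by
    have h1 : vals.Pairwise (fun a b : Int => b ≤ a) := PySem.List.sorted_pairwise_rev s _
    exact (h1.and hvnodup).imp (fun h => lt_of_le_of_ne h.1 (Ne.symm h.2))
  apply goB_eq_cmpDesc vals hvpair p q
  · exact List.pairwise_reverse.mpr ((PySem.List.sorted_pairwise a_list (fun x => x)).imp (fun h => h))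
  · exact List.pairwise_reverse.mpr ((PySem.List.sorted_pairwise b_list (fun x => x)).imp (fun h => h))
  · intro x hx
    rw [hvdef, PySem.List.mem_sorted, hsmem]
    exact Or.inl (hpperm.mem_iff.mp hx)
  · intro x hx
    rw [hvdef, PySem.List.mem_sorted, hsmem]
    exact Or.inr (hqperm.mem_iff.mp hx)
  · intro u _
    rw [PySem.Dict.getD_counter, hpperm.count_eq]
  · intro u _
    rw [PySem.Dict.getD_counter, hqperm.count_eq]

-- ===== VERDICT (by name: the statement is the Claim_ definition above) =====
theorem check_win_2_spec : Claim_equal_check_win_2 := by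
  intro a_list b_list _
  unfold Spec_check_win_2
  rw [check_win_2_eq_cmpDesc, check_win_2_alt_eq_cmpDesc]
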